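-- pv_equiv track=rewrite | github.com/icdev-ai/icdev | tools/compliance/universal_classification_manager.py | get_highest_sensitivity
-- ===== SOURCE A (Python) =====
-- from typing import Dict, List, Optional
--
-- SENSITIVITY_ORDER = [
--     "TOP_SECRET", "SECRET", "CUI", "ITAR", "FTI",
--     "CJIS", "PHI", "PCI", "PII", "PUBLIC",
-- ]
--
-- _CATEGORY_ALIASES = {
--     "TOP SECRET": "TOP_SECRET",
--     "TOP SECRET//SCI": "TOP_SECRET",
--     "TS": "TOP_SECRET",
--     "S": "SECRET",
--     "HIPAA": "PHI",
--     "PCI DSS": "PCI",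
--     "PCI-DSS": "PCI",
--     "FBI CJIS": "CJIS",
--     "IRS 1075": "FTI",
--     "NIST 800-122": "PII",
-- }
--
-- def _normalize_category(category: str) -> str:
--     """Normalize a category string to its canonical form."""
--     upper = category.upper().strip()
--     return _CATEGORY_ALIASES.get(upper, upper)
--
-- def get_highest_sensitivity(categories: List[str]) -> str:
--     """Return the highest-sensitivity category from the list."""
--     if not categories:
--         return "PUBLIC"
--     normalized = [_normalize_category(c) for c in categories]
--     best = "PUBLIC"
--     best_rank = len(SENSITIVITY_ORDER)
--     for cat in normalized:
--         rank = SENSITIVITY_ORDER.index(cat) if cat in SENSITIVITY_ORDER else 99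
--         if rank < best_rank:
--             best = cat
--             best_rank = rank
--     return best
-- ===== SOURCE B (Python) =====
-- from typing import List
--
-- def _canon(category: str) -> str:
--     """Canonical label via an explicit decision chain (no dict lookup)."""
--     u = category.upper().strip()
--     if u in ("TOP SECRET", "TOP SECRET//SCI", "TS"):
--         return "TOP_SECRET"
--     if u == "S":
--         return "SECRET"
--     if u == "HIPAA":
--         return "PHI"
--     if u in ("PCI DSS", "PCI-DSS"):
--         return "PCI"
--     if u == "FBI CJIS":
--         return "CJIS"
--     if u == "IRS 1075":
--         return "FTI"
--     if u == "NIST 800-122":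
--         return "PII"
--     return u
--
-- def _first_present(categories: List[str], order: List[str]) -> str:
--     """Recursively walk the priority order, returning the first label some
--     element of categories normalizes to."""
--     if not order:
--         return "PUBLIC"
--     label, rest = order[0], order[1:]
--     if any(_canon(c) == label for c in categories):
--         return label
--     return _first_present(categories, rest)
--
-- def get_highest_sensitivity(categories: List[str]) -> str:
--     """Return the highest-sensitivity category from the list."""
--     if not categories:
--         return "PUBLIC"
--     return _first_present(categories,
--         ["TOP_SECRET", "SECRET", "CUI", "ITAR", "FTI",
--          "CJIS", "PHI", "PCI", "PII", "PUBLIC"])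
-- ===== Notes on version B (the rewrite author's own statement) =====
-- stated objective: alternative
-- what changed: Replaces the input-scan with a running minimum rank (list.index inside the loop) by a recursive walk over the priority order that returns the first label some input element normalizes to, with normalization done by an explicit decision chain instead of a dict lookup.
import Mathlib
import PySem

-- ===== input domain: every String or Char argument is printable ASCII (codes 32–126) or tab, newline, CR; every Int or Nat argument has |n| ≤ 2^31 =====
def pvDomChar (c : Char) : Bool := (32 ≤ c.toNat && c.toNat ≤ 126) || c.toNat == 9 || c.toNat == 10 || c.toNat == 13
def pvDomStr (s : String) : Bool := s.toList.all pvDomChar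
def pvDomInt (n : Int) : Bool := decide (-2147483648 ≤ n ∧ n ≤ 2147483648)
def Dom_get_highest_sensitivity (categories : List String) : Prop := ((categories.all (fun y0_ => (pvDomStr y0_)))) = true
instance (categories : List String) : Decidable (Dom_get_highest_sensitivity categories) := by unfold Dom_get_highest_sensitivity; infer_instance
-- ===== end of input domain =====

-- B replaces A's running-minimum-rank scan over the input by a recursive walk over the
-- priority order returning the first label some input element normalizes to, and replaces
-- the alias dict by an explicit decision chain (alternative; same cost).

-- ===== PORT A =====
def pvOrder : List String :=
  ["TOP_SECRET", "SECRET", "CUI", "ITAR", "FTI", "CJIS", "PHI", "PCI", "PII", "PUBLIC"]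

def pvAliases : PySem.Dict String String :=
  PySem.Dict.ofList
    [("TOP SECRET", "TOP_SECRET"), ("TOP SECRET//SCI", "TOP_SECRET"), ("TS", "TOP_SECRET"),
     ("S", "SECRET"), ("HIPAA", "PHI"), ("PCI DSS", "PCI"), ("PCI-DSS", "PCI"),
     ("FBI CJIS", "CJIS"), ("IRS 1075", "FTI"), ("NIST 800-122", "PII")]

def pvNormalize (category : String) : String :=
  let upper := PySem.Str.strip (PySem.Str.upper category)
  PySem.Dict.getD pvAliases upper upper

def get_highest_sensitivity (categories : List String) : String :=
  if categories = [] then "PUBLIC"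
  else
    let normalized := categories.map pvNormalize
    (normalized.foldl
      (fun (s : String × Int) cat =>
        let rank : Int :=
          if pvOrder.contains cat then (((PySem.List.index? pvOrder cat).getD 0 : Nat) : Int)
          else 99
        if rank < s.2 then (cat, rank) else s)
      ("PUBLIC", (pvOrder.length : Int))).1

-- ===== PORT B =====
def pvCanon (category : String) : String :=
  let u := PySem.Str.strip (PySem.Str.upper category)
  if u = "TOP SECRET" ∨ u = "TOP SECRET//SCI" ∨ u = "TS" then "TOP_SECRET"
  else if u = "S" then "SECRET"
  else if u = "HIPAA" then "PHI"
  else if u = "PCI DSS" ∨ u = "PCI-DSS" then "PCI"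
  else if u = "FBI CJIS" then "CJIS"
  else if u = "IRS 1075" then "FTI"
  else if u = "NIST 800-122" then "PII"
  else u

def pvFirstPresent (categories : List String) : List String → String
  | [] => "PUBLIC"
  | label :: rest =>
      if categories.any (fun c => pvCanon c = label) then label
      else pvFirstPresent categories rest

def get_highest_sensitivity_alt (categories : List String) : String :=
  if categories = [] then "PUBLIC"
  else pvFirstPresent categories
    ["TOP_SECRET", "SECRET", "CUI", "ITAR", "FTI", "CJIS", "PHI", "PCI", "PII", "PUBLIC"]

-- ===== PRECONDITION & SPEC =====
def Spec_get_highest_sensitivity (categories : List String) (out : String) : Prop := out = get_highest_sensitivity_alt categories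
instance (categories : List String) (out : String) : Decidable (Spec_get_highest_sensitivity categories out) := by unfold Spec_get_highest_sensitivity; infer_instance

-- ===== CLAIM (what is proved, stated in full; the proofs are below) =====
def Claim_equal_get_highest_sensitivity : Prop := ∀ (categories : List String), Dom_get_highest_sensitivity categories → Spec_get_highest_sensitivity categories (get_highest_sensitivity categories)

-- ===== LEMMAS AND PROOFS =====

-- B's decision chain computes exactly A's dict-based normalization
lemma pvCanon_eq (c : String) : pvCanon c = pvNormalize c := by
  unfold pvCanon pvNormalize
  generalize PySem.Str.strip (PySem.Str.upper c) = u
  dsimp only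
  split_ifs with h1 h2 h3 h4 h5 h6 h7
  · rcases h1 with rfl | rfl | rfl <;> rfl
  · subst h2; rfl
  · subst h3; rfl
  · rcases h4 with rfl | rfl <;> rfl
  · subst h5; rfl
  · subst h6; rfl
  · subst h7; rfl
  · simp only [not_or] at h1 h4
    obtain ⟨k1, k2, k3⟩ := h1
    obtain ⟨k4, k5⟩ := h4
    have hA : pvAliases = PySem.Dict.mk
        [("TOP SECRET", "TOP_SECRET"), ("TOP SECRET//SCI", "TOP_SECRET"), ("TS", "TOP_SECRET"),
         ("S", "SECRET"), ("HIPAA", "PHI"), ("PCI DSS", "PCI"), ("PCI-DSS", "PCI"),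
         ("FBI CJIS", "CJIS"), ("IRS 1075", "FTI"), ("NIST 800-122", "PII")] := by decide
    simp [hA, PySem.Dict.getD, PySem.Dict.get?,
      Ne.symm k1, Ne.symm k2, Ne.symm k3, Ne.symm h2, Ne.symm h3, Ne.symm k4, Ne.symm k5,
      Ne.symm h5, Ne.symm h6, Ne.symm h7]

-- A's per-element rank and loop step, named for the proofs
def pvRk (cat : String) : Int :=
  if pvOrder.contains cat then (((PySem.List.index? pvOrder cat).getD 0 : Nat) : Int) else 99

def pvStep (s : String × Int) (cat : String) : String × Int :=
  if pvRk cat < s.2 then (cat, pvRk cat) else s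

lemma pvRk_cases (c : String) : pvRk c = 99 ∨ (c ∈ pvOrder ∧ pvRk c = (pvOrder.idxOf c : Int) ∧ pvRk c < 10) := by
  by_cases h : c ∈ pvOrder
  · right
    refine ⟨h, ?_, ?_⟩ <;> fin_cases h <;> decide
  · left
    simp [pvRk, h]

-- invariant of A's fold: the final rank is a lower bound of all ranks seen, and the
-- final best is either the initial state or an element of the list realizing its rank
lemma pvFold_inv (ns : List String) : ∀ (b : String) (r : Int),
    (ns.foldl pvStep (b, r)).2 ≤ r ∧
    (∀ c ∈ ns, (ns.foldl pvStep (b, r)).2 ≤ pvRk c) ∧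
    (ns.foldl pvStep (b, r) = (b, r) ∨
      ((ns.foldl pvStep (b, r)).1 ∈ ns ∧ pvRk (ns.foldl pvStep (b, r)).1 = (ns.foldl pvStep (b, r)).2)) := by
  induction ns with
  | nil => intro b r; exact ⟨le_refl _, by simp, Or.inl rfl⟩
  | cons c rest ih =>
    intro b r
    by_cases h : pvRk c < r
    · have hstep : (c :: rest).foldl pvStep (b, r) = rest.foldl pvStep (c, pvRk c) := by
        simp [List.foldl, pvStep, h]
      obtain ⟨h1, h2, h3⟩ := ih c (pvRk c)
      refine ⟨by rw [hstep]; omega, ?_, ?_⟩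
      · intro x hx
        rcases List.mem_cons.mp hx with hx | hx
        · rw [hstep, hx]; exact h1
        · rw [hstep]; exact h2 x hx
      · rw [hstep]
        rcases h3 with h3 | h3
        · exact Or.inr ⟨by rw [h3]; exact List.mem_cons_self, by rw [h3]⟩
        · exact Or.inr ⟨List.mem_cons_of_mem _ h3.1, h3.2⟩
    · have hstep : (c :: rest).foldl pvStep (b, r) = rest.foldl pvStep (b, r) := by
        simp [List.foldl, pvStep, h]
      obtain ⟨h1, h2, h3⟩ := ih b r
      refine ⟨by rw [hstep]; exact h1, ?_, ?_⟩
      · intro x hx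
        rcases List.mem_cons.mp hx with hx | hx
        · rw [hstep, hx]; omega
        · rw [hstep]; exact h2 x hx
      · rw [hstep]
        rcases h3 with h3 | h3
        · exact Or.inl h3
        · exact Or.inr ⟨List.mem_cons_of_mem _ h3.1, h3.2⟩

-- find? returns the first satisfying element: its index is minimal among satisfiers
lemma pvFind_first {α : Type} [DecidableEq α] (l : List α) (p : α → Bool) (a x : α)
    (hf : l.find? p = some a) (hx : x ∈ l) (hpx : p x = true) : l.idxOf a ≤ l.idxOf x := by
  induction l with
  | nil => cases hf
  | cons c rest ih =>
    by_cases hc : p c = true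
    · have hca : c = a := by simpa [List.find?, hc] using hf
      rcases hca
      simp
    · have hf' : rest.find? p = some a := by simpa [List.find?, hc] using hf
      have hxr : x ∈ rest := by
        rcases List.mem_cons.mp hx with h | h
        · exact absurd (h ▸ hpx) hc
        · exact h
      by_cases hac : a = c
      · simp [hac, List.idxOf_cons]
      · have hxc : x ≠ c := fun h => hc (h ▸ hpx)
        have h1 : (c :: rest).idxOf a = rest.idxOf a + 1 := by
          simp [Ne.symm hac]
        have h2 : (c :: rest).idxOf x = rest.idxOf x + 1 := by
          simp [Ne.symm hxc]
        rw [h1, h2]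
        exact Nat.succ_le_succ (ih hf' hxr)

lemma pvRk_inj (a b : String) (ha : a ∈ pvOrder) (hb : b ∈ pvOrder) (h : pvRk a = pvRk b) :
    a = b := by
  fin_cases ha <;> fin_cases hb <;> first | rfl | (exfalso; revert h; decide)

-- the heart: A's fold over any list equals the first-label-present scan (phrased via find?)
lemma pvMain (ns : List String) :
    (ns.foldl pvStep ("PUBLIC", (pvOrder.length : Int))).1 =
      (match pvOrder.find? (fun label => ns.contains label) with
       | some label => label
       | none => "PUBLIC") := by
  obtain ⟨h1, h2, h3⟩ := pvFold_inv ns "PUBLIC" (pvOrder.length : Int)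
  set res := ns.foldl pvStep ("PUBLIC", (pvOrder.length : Int)) with hres
  cases hf : pvOrder.find? (fun label => ns.contains label) with
  | none =>
    have hnone : ∀ l ∈ pvOrder, ns.contains l = false := by
      intro l hl
      have := List.find?_eq_none.mp hf l hl
      simpa using this
    rcases h3 with h3 | h3
    · rw [h3]
    · rcases pvRk_cases res.1 with hc | hc
      · exfalso
        have e : res.2 = 99 := by rw [← h3.2, hc]
        have hlen : (pvOrder.length : Int) = 10 := by decide
        omega
      · exfalso
        have := hnone res.1 hc.1
        simp [List.contains_eq_mem] at this
        exact this h3.1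
  | some l =>
    have hpl : ns.contains l = true := List.find?_some hf
    have hlmem : l ∈ ns := by simpa [List.contains_eq_mem] using hpl
    have hlord : l ∈ pvOrder := List.mem_of_find?_eq_some hf
    have hrkl : pvRk l < 10 := by
      rcases pvRk_cases l with h | h
      · exfalso; fin_cases hlord <;> revert h <;> decide
      · exact h.2.2
    have hr2 : res.2 ≤ pvRk l := h2 l hlmem
    have hlt : res.2 < 10 := lt_of_le_of_lt hr2 hrkl
    rcases h3 with h3 | h3
    · exfalso
      have : res.2 = (pvOrder.length : Int) := by rw [h3]
      simp [pvOrder] at this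
      omega
    · have hrmem : res.1 ∈ pvOrder := by
        rcases pvRk_cases res.1 with hc | hc
        · exfalso; rw [hc] at h3; omega
        · exact hc.1
      have hp1 : ns.contains res.1 = true := by
        simpa [List.contains_eq_mem] using h3.1
      have hidx : pvOrder.idxOf l ≤ pvOrder.idxOf res.1 :=
        pvFind_first pvOrder _ l res.1 hf hrmem hp1
      have hrkres : pvRk res.1 = (pvOrder.idxOf res.1 : Int) := by
        rcases pvRk_cases res.1 with hc | hc
        · exfalso; rw [hc] at h3; omega
        · exact hc.2.1
      have hrkl' : pvRk l = (pvOrder.idxOf l : Int) := by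
        rcases pvRk_cases l with hc | hc
        · omega
        · exact hc.2.1
      have : pvRk l = pvRk res.1 := by
        have h4 : pvRk res.1 = res.2 := h3.2
        rw [hrkres] at h4
        rw [hrkl'] at hr2
        rw [hrkres, hrkl']
        omega
      exact (pvRk_inj l res.1 hlord hrmem this).symm

-- B's recursive priority walk is the find?-phrasing of the same scan
lemma pvFirstPresent_eq_find (categories : List String) (ol : List String) :
    pvFirstPresent categories ol =
      (match ol.find? (fun label => (categories.map pvNormalize).contains label) with
       | some label => label
       | none => "PUBLIC") := by
  induction ol with
  | nil => rfl
  | cons l rest ih =>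
    have hpred : (categories.any (fun c => pvCanon c = l)) =
        ((categories.map pvNormalize).contains l) := by
      simp [List.any_eq, List.contains_eq_mem, pvCanon_eq, eq_comm]
    cases h : (categories.map pvNormalize).contains l with
    | true =>
      have hb : (categories.any (fun c => pvCanon c = l)) = true := hpred.trans h
      rw [List.find?_cons_of_pos (by simpa using h)]
      simp [pvFirstPresent, hb]
    | false =>
      have hb : (categories.any (fun c => pvCanon c = l)) = false := hpred.trans h
      rw [List.find?_cons_of_neg (by simpa using h), ← ih]
      simp [pvFirstPresent, hb]

-- ===== VERDICT (by name: the statement is the Claim_ definition above) =====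
theorem get_highest_sensitivity_spec : Claim_equal_get_highest_sensitivity := by
  intro categories _
  unfold Spec_get_highest_sensitivity get_highest_sensitivity get_highest_sensitivity_alt
  by_cases hnil : categories = []
  · simp [hnil]
  · simp only [if_neg hnil]
    rw [pvFirstPresent_eq_find]
    exact pvMain (categories.map pvNormalize)
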